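-- pv_equiv track=rewrite | github.com/Nodes-R-Us/modeling-py | eigen_examples.py | norm_infinity
-- ===== SOURCE A (Python) =====
-- def norm_infinity(vec):
--     """
--     Given an augmented matrix it returns a list.  The [0]
--     element is the infinity norm of vec, norm_vec[1]=p
--     the index of the first component whose absolute value
--     is the norm, and norm_vec[2] is vec[p].
--
--     """
--     n = len(vec)
--     x = [vec[i] for i in range(n)]
--     norm = abs(x[0])
--     norm_index = 0
--
--     for i in range(n):
--         if  norm < abs(x[i]):
--             norm = abs(x[i])
--             norm_index = i
--     norm_vec = [norm,norm_index,vec[norm_index]]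
--     return(norm_vec)
-- ===== SOURCE B (Python) =====
-- def norm_infinity(vec):
--     norm = max(abs(v) for v in vec)
--     norm_index = next(i for i, v in enumerate(vec) if abs(v) == norm)
--     return [norm, norm_index, vec[norm_index]]
-- ===== Notes on version B (the rewrite author's own statement) =====
-- stated objective: simpler
-- what changed: Replaces A's single running strict-max scan carrying (norm, index) state with two stateless passes: max of absolute values, then the first index attaining it.
import Mathlib
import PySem

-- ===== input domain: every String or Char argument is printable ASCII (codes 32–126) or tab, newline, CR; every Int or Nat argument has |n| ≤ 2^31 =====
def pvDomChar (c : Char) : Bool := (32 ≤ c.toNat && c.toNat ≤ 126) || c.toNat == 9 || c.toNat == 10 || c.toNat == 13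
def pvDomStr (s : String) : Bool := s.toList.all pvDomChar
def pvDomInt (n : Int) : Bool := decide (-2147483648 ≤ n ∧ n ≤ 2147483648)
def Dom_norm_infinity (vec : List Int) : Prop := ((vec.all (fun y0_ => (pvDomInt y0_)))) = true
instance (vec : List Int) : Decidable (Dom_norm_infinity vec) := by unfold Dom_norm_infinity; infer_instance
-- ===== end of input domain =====

-- B replaces A's single stateful strict-max scan by two stateless passes (max of |v|, then first index attaining it); equal on nonempty vectors.

-- ===== PORT A =====
-- A's loop over range(n) carrying (norm, norm_index); the final vec[norm_index] access is
-- always in range (0 ≤ norm_index < n), so getD is exact there.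
def norm_infinity (vec : List Int) : List Int :=
  match vec with
  | [] => []  -- unreachable under Pre_ (Python raises IndexError on x[0])
  | h :: _ =>
    let r := (PySem.List.enumerate vec).foldl
      (fun (s : Int × Int) (p : Int × Int) => if s.1 < |p.2| then (|p.2|, p.1) else s) (|h|, 0)
    [r.1, r.2, vec.getD r.2.toNat 0]

-- ===== PORT B =====
-- max(abs(v) for v in vec) ported as a fold of max over the tail; next(...) as findIdx,
-- which always finds a hit (the max is attained), so findIdx/getD are exact here.
def norm_infinity_alt (vec : List Int) : List Int :=
  match vec with
  | [] => []  -- unreachable under Pre_ (Python raises ValueError on max of empty)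
  | h :: t =>
    let norm := t.foldl (fun m v => max m |v|) |h|
    let idx := vec.findIdx (fun v => |v| == norm)
    [norm, (idx : Int), vec.getD idx 0]

-- ===== PRECONDITION & SPEC =====
-- Pre_ excludes only the empty list, on which Python A raises IndexError.
def Pre_norm_infinity (vec : List Int) : Prop := vec ≠ []
instance (vec : List Int) : Decidable (Pre_norm_infinity vec) := by unfold Pre_norm_infinity; infer_instance
def pvWitness_norm_infinity : List Int := [3, -7, 7, 2]

def Spec_norm_infinity (vec : List Int) (out : List Int) : Prop := out = norm_infinity_alt vec
instance (vec : List Int) (out : List Int) : Decidable (Spec_norm_infinity vec out) := by unfold Spec_norm_infinity; infer_instance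

-- ===== CLAIM (what is proved, stated in full; the proofs are below) =====
def Claim_equal_norm_infinity : Prop := ∀ (vec : List Int), Dom_norm_infinity vec → Pre_norm_infinity vec → Spec_norm_infinity vec (norm_infinity vec)

-- ===== LEMMAS AND PROOFS =====

-- m ≤ foldl max m
theorem le_maxAbsFold (l : List Int) (m : Int) : m ≤ l.foldl (fun a v => max a |v|) m := by
  induction l generalizing m with
  | nil => simp
  | cons h t ih =>
    simp only [List.foldl_cons]
    exact le_trans (le_max_left _ _) (ih (max m |h|))

-- first component of A's scan = B's running max
theorem scan_fst (l : List Int) (k : Int) (m i : Int) :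
    ((PySem.List.enumerate l k).foldl
      (fun (s : Int × Int) (p : Int × Int) => if s.1 < |p.2| then (|p.2|, p.1) else s) (m, i)).1
    = l.foldl (fun a v => max a |v|) m := by
  induction l generalizing k m i with
  | nil => simp [PySem.List.enumerate_nil]
  | cons h t ih =>
    simp only [PySem.List.enumerate_cons, List.foldl_cons]
    by_cases hc : m < |h|
    · rw [if_pos hc, ih, max_eq_right hc.le]
    · rw [if_neg hc, ih, max_eq_left (le_of_not_gt hc)]

-- second component of A's scan = k + first index attaining the running max (i if no element exceeds m)
theorem scan_snd (l : List Int) (k : Int) (m i : Int) :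
    ((PySem.List.enumerate l k).foldl
      (fun (s : Int × Int) (p : Int × Int) => if s.1 < |p.2| then (|p.2|, p.1) else s) (m, i)).2
    = if l.foldl (fun a v => max a |v|) m = m then i
      else k + ((l.findIdx (fun v => |v| == l.foldl (fun a v => max a |v|) m) : Nat) : Int) := by
  induction l generalizing k m i with
  | nil => simp [PySem.List.enumerate_nil]
  | cons h t ih =>
    simp only [PySem.List.enumerate_cons, List.foldl_cons]
    by_cases hc : m < |h|
    · rw [if_pos hc, ih, max_eq_right hc.le]
      have hM : |h| ≤ t.foldl (fun a v => max a |v|) |h| := le_maxAbsFold t |h|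
      have hne : t.foldl (fun a v => max a |v|) |h| ≠ m := fun he => absurd (he ▸ hM) (not_le.mpr hc)
      rw [if_neg hne]
      by_cases he : t.foldl (fun a v => max a |v|) |h| = |h|
      · rw [if_pos he]
        have hb : (|h| == t.foldl (fun a v => max a |v|) |h|) = true := by simp [he]
        simp [List.findIdx_cons, hb]
      · rw [if_neg he]
        have hb : (|h| == t.foldl (fun a v => max a |v|) |h|) = false := by
          simp only [beq_eq_false_iff_ne, ne_eq]
          exact fun hh => he hh.symm
        simp only [List.findIdx_cons, hb, cond_false]
        push_cast
        ring
    · rw [if_neg hc, ih, max_eq_left (le_of_not_gt hc)]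
      by_cases he : t.foldl (fun a v => max a |v|) m = m
      · rw [if_pos he, if_pos he]
      · rw [if_neg he, if_neg he]
        have hM : m ≤ t.foldl (fun a v => max a |v|) m := le_maxAbsFold t m
        have hlt : |h| < t.foldl (fun a v => max a |v|) m :=
          lt_of_le_of_lt (le_of_not_gt hc) (lt_of_le_of_ne hM (Ne.symm he))
        have hb : (|h| == t.foldl (fun a v => max a |v|) m) = false := by
          simp only [beq_eq_false_iff_ne, ne_eq]
          exact ne_of_lt hlt
        simp only [List.findIdx_cons, hb, cond_false]
        push_cast
        ring

-- ===== VERDICT (by name: the statement is the Claim_ definition above) =====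
theorem norm_infinity_spec : Claim_equal_norm_infinity := by
  intro vec _ hpre
  unfold Spec_norm_infinity norm_infinity norm_infinity_alt
  match vec, hpre with
  | h :: t, _ =>
    simp only
    rw [scan_fst, scan_snd]
    simp only [List.foldl_cons, max_self]
    by_cases he : t.foldl (fun a v => max a |v|) |h| = |h|
    · rw [if_pos he]
      have hb : (|h| == t.foldl (fun a v => max a |v|) |h|) = true := by simp [he]
      simp [List.findIdx_cons, hb]
    · rw [if_neg he]
      simp
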